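-- pv_equiv track=rewrite | github.com/briney/spir | src/spir/adapters/af3_server.py | _best_effort_components
-- ===== SOURCE A (Python) =====
-- from typing import Any, Dict, List, Optional, Tuple
--
-- def _best_effort_components(glycan_residues_spec: str) -> List[str]:
--     # Very light extraction: take tokens that look like CCD codes (alnum/_/-) ignoring parentheses and links
--     comp: List[str] = []
--     buf = []
--     i = 0
--     s = glycan_residues_spec.strip()
--     while i < len(s):
--         ch = s[i]
--         if ch.isalnum() or ch in {"_", "-"}:
--             buf.append(ch)
--             i += 1
--             continue
--         if buf:
--             comp.append("".join(buf))
--             buf = []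
--         i += 1
--     if buf:
--         comp.append("".join(buf))
--     return [c for c in comp if c]
-- ===== SOURCE B (Python) =====
-- from typing import List
--
--
-- def _best_effort_components(glycan_residues_spec: str) -> List[str]:
--     # Mask every non-token character to a space, then let str.split() extract the words.
--     ok = lambda ch: ch.isalnum() or ch in {"_", "-"}
--     masked = "".join(ch if ok(ch) else " " for ch in glycan_residues_spec)
--     return masked.split()
-- ===== Notes on version B (the rewrite author's own statement) =====
-- stated objective: simpler
-- what changed: Replaces A's character-by-character state machine (index, buffer list, explicit flush at boundaries and at the end) by two staged passes: a translate pass that masks every non-token character to a space, followed by the standard-library str.split(), which yields exactly the maximal runs of token characters.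
import Mathlib
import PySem

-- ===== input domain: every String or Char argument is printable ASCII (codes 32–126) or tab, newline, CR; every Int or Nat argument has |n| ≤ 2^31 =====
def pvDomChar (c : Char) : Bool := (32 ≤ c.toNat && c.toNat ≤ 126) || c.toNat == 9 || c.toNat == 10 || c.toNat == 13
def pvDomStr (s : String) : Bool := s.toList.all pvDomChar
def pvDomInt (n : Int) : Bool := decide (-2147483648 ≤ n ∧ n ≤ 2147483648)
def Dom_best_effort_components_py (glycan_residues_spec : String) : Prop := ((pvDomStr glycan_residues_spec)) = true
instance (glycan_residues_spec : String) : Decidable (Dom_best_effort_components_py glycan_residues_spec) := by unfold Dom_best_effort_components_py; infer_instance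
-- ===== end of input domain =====

-- B replaces A's index/buffer/flush state machine by two staged passes: mask non-token
-- characters to a space, then str.split() (simpler).

-- the shared token-character predicate: ch.isalnum() or ch in {"_", "-"}
def pvOk (c : Char) : Bool := PySem.Chars.isalnum c || c == '_' || c == '-'

-- ===== PORT A =====
-- A's while loop over index i, carried as recursion on the remaining characters,
-- with the same state (comp, buf); the trailing flush and the final filter kept.
def pvLoopA : List Char → List String → List Char → List String
  | [], comp, buf => if buf.isEmpty then comp else comp ++ [String.ofList buf]
  | c :: cs, comp, buf =>
    if pvOk c then pvLoopA cs comp (buf ++ [c])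
    else if buf.isEmpty then pvLoopA cs comp buf
    else pvLoopA cs (comp ++ [String.ofList buf]) []

def best_effort_components_py (glycan_residues_spec : String) : List String :=
  (pvLoopA (PySem.Str.strip glycan_residues_spec).toList [] []).filter (fun c => !(c == ""))

-- ===== PORT B =====
-- Source B: masked = "".join(ch if ok(ch) else " " for ch in spec), then masked.split().
def pvMask (c : Char) : Char := if pvOk c then c else ' '

def best_effort_components_py_alt (glycan_residues_spec : String) : List String :=
  PySem.Str.split₀ (String.ofList (glycan_residues_spec.toList.map pvMask))

-- ===== PRECONDITION & SPEC =====
def Spec_best_effort_components_py (glycan_residues_spec : String) (out : List String) : Prop := out = best_effort_components_py_alt glycan_residues_spec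
instance (glycan_residues_spec : String) (out : List String) : Decidable (Spec_best_effort_components_py glycan_residues_spec out) := by unfold Spec_best_effort_components_py; infer_instance

-- ===== CLAIM (what is proved, stated in full; the proofs are below) =====
def Claim_equal_best_effort_components_py : Prop := ∀ (glycan_residues_spec : String), Dom_best_effort_components_py glycan_residues_spec → Spec_best_effort_components_py glycan_residues_spec (best_effort_components_py glycan_residues_spec)

-- ===== LEMMAS AND PROOFS =====

-- proof-side characterisation: the maximal runs of pvOk-characters, as char lists
def pvRuns : List Char → List (List Char)
  | [] => []
  | c :: cs =>
    if pvOk c then (c :: cs.takeWhile pvOk) :: pvRuns (cs.dropWhile pvOk)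
    else pvRuns cs
termination_by l => l.length
decreasing_by
  · exact Nat.lt_succ_of_le (List.length_dropWhile_le _ _)
  · simp

-- token characters are never whitespace (both are plain ASCII ranges)
theorem pvOk_not_space (c : Char) (h : pvOk c = true) : PySem.Chars.isspace c = false := by
  unfold pvOk at h
  simp only [PySem.Chars.isalnum, PySem.Chars.isalpha, PySem.Chars.isdigit, PySem.Chars.isupper,
    PySem.Chars.islower, Bool.or_eq_true, Bool.and_eq_true, decide_eq_true_eq, beq_iff_eq] at h
  simp only [PySem.Chars.isspace, Bool.or_eq_false_iff, Bool.and_eq_false_iff,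
    decide_eq_false_iff_not]
  simp only [Char.le_def, UInt32.le_iff_toNat_le] at h
  have hv : c.toNat = c.val.toNat := rfl
  have e1 : 'A'.val.toNat = 65 := rfl
  have e2 : 'Z'.val.toNat = 90 := rfl
  have e3 : 'a'.val.toNat = 97 := rfl
  have e4 : 'z'.val.toNat = 122 := rfl
  have e5 : '0'.val.toNat = 48 := rfl
  have e6 : '9'.val.toNat = 57 := rfl
  rcases h with ((⟨h1, h2⟩ | ⟨h1, h2⟩) | ⟨h1, h2⟩) | he | he
  · omega
  · omega
  · omega
  · decide
  · decide

theorem pvSpace_not_ok (c : Char) (h : PySem.Chars.isspace c = true) : pvOk c = false := by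
  cases hok : pvOk c
  · rfl
  · rw [pvOk_not_space c hok] at h; exact absurd h (by simp)

-- A's loop (for any pending state) produces the runs of its input
theorem pvLoopA_eq (l : List Char) : ∀ (comp : List String) (buf : List Char),
    pvLoopA l comp buf =
      comp ++ (if buf.isEmpty then (pvRuns l).map String.ofList
               else String.ofList (buf ++ l.takeWhile pvOk) ::
                    (pvRuns (l.dropWhile pvOk)).map String.ofList) := by
  induction l with
  | nil =>
    intro comp buf
    cases buf <;> simp [pvLoopA, pvRuns]
  | cons c cs ih =>
    intro comp buf
    by_cases hc : pvOk c
    · cases buf with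
      | nil =>
        simp only [pvLoopA, hc, if_true, List.isEmpty_nil]
        rw [ih comp ([] ++ [c])]
        simp [pvRuns, hc]
      | cons b bs =>
        simp only [pvLoopA, hc, if_true]
        rw [ih comp ((b :: bs) ++ [c])]
        simp [hc]
    · cases buf with
      | nil =>
        simp only [pvLoopA, hc, Bool.false_eq_true, if_false, List.isEmpty_nil, if_true]
        rw [ih comp []]
        simp [pvRuns, hc]
      | cons b bs =>
        simp only [pvLoopA, hc, Bool.false_eq_true, if_false, List.isEmpty_cons, if_false]
        rw [ih (comp ++ [String.ofList (b :: bs)]) []]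
        simp [pvRuns, hc]

-- every run is a nonempty char list
theorem pvRuns_ne_nil (l : List Char) : ∀ r ∈ pvRuns l, r ≠ [] := by
  induction l using pvRuns.induct with
  | case1 => simp [pvRuns]
  | case2 c cs hc ih =>
    intro r hr
    simp only [pvRuns, hc, if_true, List.mem_cons] at hr
    rcases hr with h | h
    · subst h; simp
    · exact ih r h
  | case3 c cs hc ih =>
    intro r hr
    simp only [pvRuns, hc, Bool.false_eq_true, if_false] at hr
    exact ih r hr

-- split₀'s worker on the masked input produces the runs of the original input
theorem pvGo_eq (l : List Char) : ∀ (cur : List Char) (acc : List (List Char)),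
    PySem.Chars.split₀.go (l.map pvMask) cur acc =
      acc.reverse ++ (if cur.isEmpty then pvRuns l
                      else (cur.reverse ++ l.takeWhile pvOk) :: pvRuns (l.dropWhile pvOk)) := by
  induction l with
  | nil =>
    intro cur acc
    cases cur <;> simp [PySem.Chars.split₀.go, pvRuns]
  | cons c cs ih =>
    intro cur acc
    by_cases hc : pvOk c
    · have hm : pvMask c = c := by simp [pvMask, hc]
      have hs : PySem.Chars.isspace c = false := pvOk_not_space c hc
      simp only [List.map_cons, hm, PySem.Chars.split₀.go, hs, Bool.false_eq_true, if_false]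
      rw [ih (c :: cur)]
      cases cur <;>
        simp [pvRuns, hc]
    · have hm : pvMask c = ' ' := by simp [pvMask, hc]
      have hs : PySem.Chars.isspace ' ' = true := by decide
      simp only [List.map_cons, hm, PySem.Chars.split₀.go, hs, if_true]
      cases cur with
      | nil =>
        simp only [List.isEmpty_nil, if_true]
        rw [ih [] acc]
        simp [pvRuns, hc]
      | cons b bs =>
        simp only [List.isEmpty_cons, if_false]
        rw [ih [] ((b :: bs).reverse :: acc)]
        simp [pvRuns, hc]

-- dropping leading whitespace does not change the runs
theorem pvRuns_dropWhile_space (l : List Char) :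
    pvRuns (l.dropWhile PySem.Chars.isspace) = pvRuns l := by
  induction l with
  | nil => rfl
  | cons c cs ih =>
    by_cases hs : PySem.Chars.isspace c = true
    · rw [List.dropWhile_cons_of_pos hs, ih]
      have := pvSpace_not_ok c hs
      simp [pvRuns, this]
    · rw [List.dropWhile_cons_of_neg hs]

-- an all-whitespace list has no runs
theorem pvRuns_space (t : List Char) (ht : ∀ c ∈ t, PySem.Chars.isspace c = true) :
    pvRuns t = [] := by
  induction t with
  | nil => simp [pvRuns]
  | cons c cs iht =>
    have := pvSpace_not_ok c (ht c (by simp))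
    simp only [pvRuns, this, Bool.false_eq_true, if_false]
    exact iht (fun x hx => ht x (by simp [hx]))

-- appending trailing whitespace does not change the runs
theorem pvRuns_append_space (l t : List Char) (ht : ∀ c ∈ t, PySem.Chars.isspace c = true) :
    pvRuns (l ++ t) = pvRuns l := by
  induction l using pvRuns.induct with
  | case1 => rw [List.nil_append, pvRuns_space t ht]; simp [pvRuns]
  | case2 c cs hc ih =>
    have httake : t.takeWhile pvOk = [] := by
      cases t with
      | nil => rfl
      | cons d ds =>
        have := pvSpace_not_ok d (ht d (by simp))
        simp [this]
    have htdrop : t.dropWhile pvOk = t := by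
      cases t with
      | nil => rfl
      | cons d ds =>
        have := pvSpace_not_ok d (ht d (by simp))
        simp [this]
    by_cases hall : ∀ x ∈ cs, pvOk x = true
    · have htake2 : cs.takeWhile pvOk = cs := List.takeWhile_eq_self_iff.mpr hall
      have hdrop2 : cs.dropWhile pvOk = [] := List.dropWhile_eq_nil_iff.mpr hall
      have htake : (cs ++ t).takeWhile pvOk = cs ++ t.takeWhile pvOk := by
        rw [List.takeWhile_append, htake2]; simp
      have hdrop : (cs ++ t).dropWhile pvOk = t.dropWhile pvOk := by
        rw [List.dropWhile_append, hdrop2]; simp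
      simp [pvRuns, hc, htake, hdrop, htake2, hdrop2, httake, htdrop, pvRuns_space t ht]
    · have hlen : ¬ (cs.takeWhile pvOk).length = cs.length := by
        intro hl
        exact hall (List.takeWhile_eq_self_iff.mp
          ((List.takeWhile_prefix pvOk).eq_of_length hl))
      have hdne : ¬ (cs.dropWhile pvOk).isEmpty = true := by
        simp only [List.isEmpty_iff, List.dropWhile_eq_nil_iff]
        exact hall
      have htake : (cs ++ t).takeWhile pvOk = cs.takeWhile pvOk := by
        rw [List.takeWhile_append, if_neg hlen]
      have hdrop : (cs ++ t).dropWhile pvOk = cs.dropWhile pvOk ++ t := by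
        rw [List.dropWhile_append, if_neg hdne]
      simp only [List.cons_append, pvRuns, hc, if_true, htake, hdrop]
      rw [ih]
  | case3 c cs hc ih =>
    simp only [List.cons_append, pvRuns, hc, Bool.false_eq_true, if_false]
    exact ih

-- stripping does not change the runs
theorem pvRuns_strip (l : List Char) : pvRuns (PySem.Chars.strip l) = pvRuns l := by
  unfold PySem.Chars.strip PySem.Chars.rstrip PySem.Chars.lstrip
  have h1 : pvRuns (((l.dropWhile PySem.Chars.isspace).reverse.dropWhile
      PySem.Chars.isspace).reverse) = pvRuns (l.dropWhile PySem.Chars.isspace) := by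
    set m := l.dropWhile PySem.Chars.isspace with hm
    have hsplit : m = (m.reverse.dropWhile PySem.Chars.isspace).reverse ++
        (m.reverse.takeWhile PySem.Chars.isspace).reverse := by
      have h := List.takeWhile_append_dropWhile (p := PySem.Chars.isspace) (l := m.reverse)
      calc m = (m.reverse.takeWhile PySem.Chars.isspace ++
                m.reverse.dropWhile PySem.Chars.isspace).reverse := by
                rw [h, List.reverse_reverse]
        _ = _ := by rw [List.reverse_append]
    conv_rhs => rw [hsplit]
    rw [pvRuns_append_space]
    intro c hcm
    have : c ∈ m.reverse.takeWhile PySem.Chars.isspace := by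
      simpa using hcm
    exact List.mem_takeWhile_imp this
  rw [h1, pvRuns_dropWhile_space]

-- filtering out "" keeps everything: every run is nonempty
theorem pvFilter_runs (rs : List (List Char)) (h : ∀ r ∈ rs, r ≠ []) :
    (rs.map String.ofList).filter (fun c => !(c == "")) = rs.map String.ofList := by
  apply List.filter_eq_self.mpr
  intro s hs
  rcases List.mem_map.mp hs with ⟨r, hr, rfl⟩
  have hne : ¬ (String.ofList r = "") := by
    intro he
    apply h r hr
    have h2 := congrArg String.toList he
    simpa using h2
  simp [hne]

-- ===== VERDICT (by name: the statement is the Claim_ definition above) =====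
theorem best_effort_components_py_spec : Claim_equal_best_effort_components_py := by
  intro s _
  unfold Spec_best_effort_components_py best_effort_components_py best_effort_components_py_alt
  rw [pvLoopA_eq]
  simp only [List.isEmpty_nil, if_true, List.nil_append]
  rw [pvFilter_runs _ (pvRuns_ne_nil _)]
  have hB : PySem.Str.split₀ (String.ofList (s.toList.map pvMask)) =
      (pvRuns s.toList).map String.ofList := by
    unfold PySem.Str.split₀ PySem.Chars.split₀
    have : (String.ofList (s.toList.map pvMask)).toList = s.toList.map pvMask := by simp
    rw [this, pvGo_eq]
    simp
  rw [hB, PySem.Str.toList_strip, pvRuns_strip]
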